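-- pv_equiv track=rewrite | github.com/rubenmaria/advent-of-code | 2025/python/five.py | binary_search_ranges
-- ===== SOURCE A (Python) =====
-- def binary_search_ranges(ranges: list[tuple[int, int]], number: int) -> bool:
--     if not ranges:
--         return False
--
--     lower_bound = 0
--     upper_bound = len(ranges) - 1
--
--     while lower_bound <= upper_bound:
--         mid = (lower_bound + upper_bound) // 2
--         start, end = ranges[mid]
--
--         if start <= number <= end:
--             return True
--
--         if number < start:
--             upper_bound = mid - 1
--         else:
--             lower_bound = mid + 1
--
--     return False
-- ===== SOURCE B (Python) =====
-- def binary_search_ranges(ranges: list[tuple[int, int]], number: int) -> bool: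
--     if not ranges:
--         return False
--     mid = (len(ranges) - 1) // 2
--     start, end = ranges[mid]
--     if start <= number <= end:
--         return True
--     if number < start:
--         return binary_search_ranges(ranges[:mid], number)
--     return binary_search_ranges(ranges[mid + 1:], number)
-- ===== Notes on version B (the rewrite author's own statement) =====
-- stated objective: alternative
-- what changed: The iterative lo/hi-index while loop is replaced by structural divide-and-conquer recursion on list slices: probe the element at (len-1)//2 and recurse on ranges[:mid] or ranges[mid+1:], which picks the identical sequence of probe elements with no index bookkeeping.
import Mathlib
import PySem

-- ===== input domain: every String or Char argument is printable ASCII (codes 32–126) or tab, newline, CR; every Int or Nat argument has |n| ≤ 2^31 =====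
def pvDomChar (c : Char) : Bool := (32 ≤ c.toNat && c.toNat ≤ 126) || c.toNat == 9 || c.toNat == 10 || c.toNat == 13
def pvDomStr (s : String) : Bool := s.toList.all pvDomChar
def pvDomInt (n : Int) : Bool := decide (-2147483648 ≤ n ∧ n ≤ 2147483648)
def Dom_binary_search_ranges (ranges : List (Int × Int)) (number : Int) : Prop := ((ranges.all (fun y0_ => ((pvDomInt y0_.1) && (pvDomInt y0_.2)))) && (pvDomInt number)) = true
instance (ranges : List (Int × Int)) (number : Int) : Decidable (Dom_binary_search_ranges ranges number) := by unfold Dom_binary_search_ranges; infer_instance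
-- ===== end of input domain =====

-- B replaces the iterative lo/hi-index binary search by structural recursion on list
-- slices (same probe elements, no index bookkeeping); objective: alternative decomposition.

-- ===== PORT A =====
-- the while loop of A, state (lower_bound, upper_bound); the `none` branch of the index
-- is Python's IndexError, unreachable from the entry call (0 ≤ lo, hi < len throughout)
def bsrLoop (ranges : List (Int × Int)) (number : Int) (lo hi : Int) : Bool :=
  if h : lo ≤ hi then
    let mid := PySem.Int.floordiv (lo + hi) 2
    match PySem.List.pyGet? ranges mid with
    | none => false
    | some (s, e) =>
      if s ≤ number ∧ number ≤ e then true
      else if number < s then bsrLoop ranges number lo (mid - 1)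
      else bsrLoop ranges number (mid + 1) hi
  else false
termination_by (hi + 1 - lo).toNat
decreasing_by
  · have := PySem.Int.floordiv_two_mid_bounds h
    omega
  · have := PySem.Int.floordiv_two_mid_bounds h
    omega

def binary_search_ranges (ranges : List (Int × Int)) (number : Int) : Bool :=
  if ranges = [] then false
  else bsrLoop ranges number 0 ((ranges.length : Int) - 1)

-- ===== PORT B =====
def binary_search_ranges_alt (ranges : List (Int × Int)) (number : Int) : Bool :=
  if hne : ranges = [] then false
  else
    let mid := PySem.Int.floordiv ((ranges.length : Int) - 1) 2
    match PySem.List.pyGet? ranges mid with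
    | none => false
    | some (s, e) =>
      if s ≤ number ∧ number ≤ e then true
      else if number < s then
        binary_search_ranges_alt (PySem.List.slice ranges none (some mid)) number
      else
        binary_search_ranges_alt (PySem.List.slice ranges (some (mid + 1)) none) number
termination_by ranges.length
decreasing_by
  · have h1 : 1 ≤ ranges.length := List.length_pos_iff.mpr hne
    have hc : ((ranges.length : Int) - 1) = ((ranges.length - 1 : Nat) : Int) := by push_cast [h1]; ring
    have hfd : PySem.Int.floordiv (((ranges.length - 1 : Nat)) : Int) 2 = (((ranges.length - 1) / 2 : Nat) : Int) := by
      exact_mod_cast PySem.Int.floordiv_natCast (ranges.length - 1) 2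
    rw [hc, hfd, PySem.List.slice_to_natCast]
    simp only [List.length_take]
    omega
  · have h1 : 1 ≤ ranges.length := List.length_pos_iff.mpr hne
    have hc : ((ranges.length : Int) - 1) = ((ranges.length - 1 : Nat) : Int) := by push_cast [h1]; ring
    have hc2 : PySem.Int.floordiv ((ranges.length : Int) - 1) 2 + 1 = (((ranges.length - 1) / 2 + 1 : Nat) : Int) := by
      have hfd : PySem.Int.floordiv (((ranges.length - 1 : Nat)) : Int) 2 = (((ranges.length - 1) / 2 : Nat) : Int) := by
        exact_mod_cast PySem.Int.floordiv_natCast (ranges.length - 1) 2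
      rw [hc, hfd]; push_cast; ring
    rw [hc2, PySem.List.slice_from_natCast]
    simp only [List.length_drop]
    omega

-- ===== PRECONDITION & SPEC =====
def Spec_binary_search_ranges (ranges : List (Int × Int)) (number : Int) (out : Bool) : Prop := out = binary_search_ranges_alt ranges number
instance (ranges : List (Int × Int)) (number : Int) (out : Bool) : Decidable (Spec_binary_search_ranges ranges number out) := by unfold Spec_binary_search_ranges; infer_instance

-- ===== CLAIM (what is proved, stated in full; the proofs are below) =====
def Claim_equal_binary_search_ranges : Prop := ∀ (ranges : List (Int × Int)) (number : Int), Dom_binary_search_ranges ranges number → Spec_binary_search_ranges ranges number (binary_search_ranges ranges number)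

-- ===== LEMMAS AND PROOFS =====

-- A's loop over window [a, b-1] computes B's recursion on the sublist ranges[a:b]
theorem bsrLoop_eq_alt (ranges : List (Int × Int)) (number : Int) :
    ∀ (n a b : Nat), b - a ≤ n → b ≤ ranges.length →
      bsrLoop ranges number (a : Int) ((b : Int) - 1) =
        binary_search_ranges_alt ((ranges.drop a).take (b - a)) number := by
  intro n
  induction n with
  | zero =>
    intro a b hba hb
    have hba' : b ≤ a := by omega
    rw [bsrLoop]
    have hcond : ¬ ((a : Int) ≤ (b : Int) - 1) := by
      omega
    have hnil : (b - a) = 0 := by omega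
    simp [hcond, hnil, binary_search_ranges_alt]
  | succ n ih =>
    intro a b hba hb
    by_cases hab : b ≤ a
    · rw [bsrLoop]
      have hcond : ¬ ((a : Int) ≤ (b : Int) - 1) := by omega
      have hnil : (b - a) = 0 := by omega
      simp [hcond, hnil, binary_search_ranges_alt]
    · -- a < b : one probe on each side, then the induction hypothesis
      have hab' : a < b := by omega
      set k : Nat := (b - a - 1) / 2 with hk
      set M : Nat := a + k with hM
      have hMb : M < b := by omega
      have hMlen : M < ranges.length := by omega
      have hsub : ((ranges.drop a).take (b - a)).length = b - a := by
        simp [List.length_take, List.length_drop]; omega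
      have hsubne : (ranges.drop a).take (b - a) ≠ [] := by
        intro hnil
        rw [hnil] at hsub
        simp at hsub; omega
      -- the midpoints coincide: (a + (b-1)) // 2 = a + (b-a-1)/2 = M
      have hmidA : PySem.Int.floordiv ((a : Int) + ((b : Int) - 1)) 2 = (M : Int) := by
        have h1 : (a : Int) + ((b : Int) - 1) = ((a + b - 1 : Nat) : Int) := by omega
        have h2 : PySem.Int.floordiv (((a + b - 1 : Nat)) : Int) 2 = (((a + b - 1) / 2 : Nat) : Int) := by
          exact_mod_cast PySem.Int.floordiv_natCast (a + b - 1) 2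
        rw [h1, h2]
        congr 1
        omega
      have hmidB : PySem.Int.floordiv (((((ranges.drop a).take (b - a)).length : Int)) - 1) 2 = (k : Int) := by
        have h1 : ((((ranges.drop a).take (b - a)).length : Int)) - 1 = ((b - a - 1 : Nat) : Int) := by
          rw [hsub]; omega
        have h2 : PySem.Int.floordiv (((b - a - 1 : Nat)) : Int) 2 = (((b - a - 1) / 2 : Nat) : Int) := by
          exact_mod_cast PySem.Int.floordiv_natCast (b - a - 1) 2
        rw [h1, h2]
      -- both probes read ranges[M]
      have hgetA : PySem.List.pyGet? ranges (M : Int) = some ranges[M] := by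
        simp [PySem.List.pyGet?_natCast, List.getElem?_eq_getElem hMlen]
      have hgetB : PySem.List.pyGet? ((ranges.drop a).take (b - a)) (k : Int) = some ranges[M] := by
        have hk1 : k < b - a := by omega
        rw [PySem.List.pyGet?_natCast, List.getElem?_take_of_lt hk1, List.getElem?_drop]
        simp [hM]
      -- the two recursive sublists
      have hleft : PySem.List.slice ((ranges.drop a).take (b - a)) none (some (k : Int)) =
          (ranges.drop a).take (M - a) := by
        rw [PySem.List.slice_to_natCast, List.take_take]
        congr 1
        omega
      have hright : PySem.List.slice ((ranges.drop a).take (b - a)) (some ((k : Int) + 1)) none =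
          (ranges.drop (M + 1)).take (b - (M + 1)) := by
        have hc : (k : Int) + 1 = ((k + 1 : Nat) : Int) := by push_cast; ring
        rw [hc, PySem.List.slice_from_natCast, List.drop_take, List.drop_drop]
        have e1 : a + (k + 1) = M + 1 := by omega
        have e2 : b - a - (k + 1) = b - (M + 1) := by omega
        rw [e1, e2]
      rw [bsrLoop]
      have hcond : (a : Int) ≤ (b : Int) - 1 := by omega
      rw [binary_search_ranges_alt]
      simp only [hcond, dif_pos, hsubne, dite_false, hmidA, hmidB, hgetA, hgetB]
      simp only [List.get_eq_getElem]
      by_cases hin : ranges[M].1 ≤ number ∧ number ≤ ranges[M].2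
      · simp [hin]
      · simp only [if_neg hin]
        by_cases hlt : number < ranges[M].1
        · simp only [if_pos hlt, hleft]
          have := ih a M (by omega) (by omega)
          simpa using this
        · simp only [if_neg hlt, hright]
          have hc : (M : Int) + 1 = ((M + 1 : Nat) : Int) := by push_cast; ring
          rw [hc]
          exact ih (M + 1) b (by omega) hb

theorem binary_search_ranges_spec : Claim_equal_binary_search_ranges := by
  intro ranges number _
  unfold Spec_binary_search_ranges binary_search_ranges
  by_cases h : ranges = []
  · simp [h, binary_search_ranges_alt]
  · have := bsrLoop_eq_alt ranges number ranges.length 0 ranges.length le_rfl le_rfl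
    simpa [h] using this
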